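-- pv_equiv track=rewrite | github.com/anakinanakin/neural-network-on-finance-data | midprice_profit_label/profit_evaluate/profit_evaluate_2005/construct.py | trans2rect
-- ===== SOURCE A (Python) =====
-- def trans2rect(label):
-- 	status = label[0]
-- 	position = 0
-- 	width = 1
-- 	rects = []
-- 	for i,l in enumerate(label[1:]):
-- 		if status == l:
-- 			width += 1
-- 		else:
-- 			rects.append((status,position,width))
-- 			status = l
-- 			position = i+1
-- 			width = 1
-- 	return rects
-- ===== SOURCE B (Python) =====
-- def trans2rect(label):
-- 	# Group the list into maximal runs (run-scan by extent), then drop the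
-- 	# final run, which A's adjacent-element state machine never emits.
-- 	rects = []
-- 	pos = 0
-- 	rest = label
-- 	while rest:
-- 		head = rest[0]
-- 		width = 1
-- 		while width < len(rest) and rest[width] == head:
-- 			width += 1
-- 		rects.append((head, pos, width))
-- 		pos += width
-- 		rest = rest[width:]
-- 	return rects[:-1]
-- ===== Notes on version B (the rewrite author's own statement) =====
-- stated objective: alternative
-- what changed: B groups the list into maximal runs with a nested scan (inner loop finds each run's extent, outer loop slices it off) and then drops the final run, instead of A's single-pass adjacent-element state machine carrying (status, position, width).
-- crash fix: A raises IndexError on the empty list (label[0]); B returns []. — e.g. on trans2rect([]): A raises IndexError, B returns []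
import Mathlib
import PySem

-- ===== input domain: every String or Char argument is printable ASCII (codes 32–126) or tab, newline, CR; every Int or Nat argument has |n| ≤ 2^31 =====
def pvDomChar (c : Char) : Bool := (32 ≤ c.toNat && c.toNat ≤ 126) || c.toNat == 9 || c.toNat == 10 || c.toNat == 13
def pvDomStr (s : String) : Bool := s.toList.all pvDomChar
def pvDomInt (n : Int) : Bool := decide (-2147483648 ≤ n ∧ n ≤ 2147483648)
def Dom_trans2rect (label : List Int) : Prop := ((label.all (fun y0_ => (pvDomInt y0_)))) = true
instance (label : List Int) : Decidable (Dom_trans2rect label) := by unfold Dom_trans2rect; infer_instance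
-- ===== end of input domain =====

-- B groups the list into maximal runs by scanning each run's extent (nested loop)
-- instead of A's single adjacent-element state machine; alternative decomposition, same cost.


-- ===== PORT A =====
-- the for-loop over enumerate(label[1:]) with state (status, position, width, rects);
-- i is the enumerate index of the element currently examined
def trans2rectLoop (rest : List Int) (i status position width : Int)
    (rects : List (Int × Int × Int)) : List (Int × Int × Int) :=
  match rest with
  | [] => rects
  | l :: rest' =>
    if status == l then
      trans2rectLoop rest' (i + 1) status position (width + 1) rects
    else
      trans2rectLoop rest' (i + 1) l (i + 1) 1 (rects ++ [(status, position, width)])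

-- 'status = label[0]' raises IndexError on []; that input is excluded by Pre_trans2rect
def trans2rect (label : List Int) : List (Int × Int × Int) :=
  match label with
  | [] => []
  | status :: rest => trans2rectLoop rest 0 status 0 1 []

-- ===== PORT B =====
-- inner while loop: 'while width < len(rest) and rest[width] == head: width += 1';
-- rest.getD width 0 is exact for rest[width] since the guard keeps width in range.
-- fuel only makes the loop total; it never runs out while the guard holds
def runLenAux (head : Int) (rest : List Int) : Nat → Nat → Nat
  | 0, width => width
  | f + 1, width =>
    if width < rest.length ∧ rest.getD width 0 = head then runLenAux head rest f (width + 1)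
    else width

def runLen (head : Int) (rest : List Int) (width : Nat) : Nat :=
  runLenAux head rest (rest.length - width) width

-- outer while loop: state (rest, pos, rects); 'rest = rest[width:]'; fuel as above
def trans2rectRunsAux : Nat → List Int → Int → List (Int × Int × Int) → List (Int × Int × Int)
  | _, [], _, rects => rects
  | 0, _ :: _, _, rects => rects
  | f + 1, head :: tail, pos, rects =>
    let w := runLen head (head :: tail) 1
    trans2rectRunsAux f ((head :: tail).drop w) (pos + (w : Int))
      (rects ++ [(head, pos, (w : Int))])

def trans2rectRuns (rest : List Int) (pos : Int) (rects : List (Int × Int × Int)) :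
    List (Int × Int × Int) :=
  trans2rectRunsAux rest.length rest pos rects

-- 'return rects[:-1]' — List.dropLast is Python's [:-1]
def trans2rect_alt (label : List Int) : List (Int × Int × Int) :=
  (trans2rectRuns label 0 []).dropLast

-- ===== PRECONDITION & SPEC =====
-- Pre_ excludes only the empty list, on which A raises IndexError (label[0]).
def Pre_trans2rect (label : List Int) : Prop := label ≠ []
instance (label : List Int) : Decidable (Pre_trans2rect label) := by unfold Pre_trans2rect; infer_instance
def pvWitness_trans2rect : List Int := [1, 1, 2, 2, 3]

-- A raises IndexError exactly on the empty list; B returns [] there.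
def Raises_trans2rect (label : List Int) : Prop := label = []
instance (label : List Int) : Decidable (Raises_trans2rect label) := by unfold Raises_trans2rect; infer_instance
def pvRaiseWitness_trans2rect : List Int := []
def pvRaiseWitnessOut_trans2rect : List (Int × Int × Int) := []

def Spec_trans2rect (label : List Int) (out : List (Int × Int × Int)) : Prop := out = trans2rect_alt label
instance (label : List Int) (out : List (Int × Int × Int)) : Decidable (Spec_trans2rect label out) := by unfold Spec_trans2rect; infer_instance

-- ===== CLAIM (what is proved, stated in full; the proofs are below) =====
def Claim_equal_trans2rect : Prop := ∀ (label : List Int), Dom_trans2rect label → Pre_trans2rect label → Spec_trans2rect label (trans2rect label)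
def Claim_raises_trans2rect : Prop := (∀ (label : List Int), Dom_trans2rect label → Raises_trans2rect label → ¬ Pre_trans2rect label) ∧ (Dom_trans2rect (pvRaiseWitness_trans2rect) ∧ Raises_trans2rect (pvRaiseWitness_trans2rect) ∧ trans2rect_alt (pvRaiseWitness_trans2rect) = pvRaiseWitnessOut_trans2rect)

-- ===== LEMMAS AND PROOFS =====

-- common reference: the full run-length decomposition (all runs, including the last)
def goRuns : Int → Int → Int → List Int → List (Int × Int × Int)
  | st, pos, w, [] => [(st, pos, w)]
  | st, pos, w, l :: r =>
    if st = l then goRuns st pos (w + 1) r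
    else (st, pos, w) :: goRuns l (pos + w) 1 r

theorem goRuns_ne_nil (st pos w : Int) (t : List Int) : goRuns st pos w t ≠ [] := by
  induction t generalizing st pos w with
  | nil => simp [goRuns]
  | cons l r ih => rw [goRuns]; split <;> simp [ih]

-- A's loop computes all runs but the last, appended to rects
theorem loopA_eq (t : List Int) : ∀ (st pos w : Int) (rects : List (Int × Int × Int)),
    trans2rectLoop t (pos + w - 1) st pos w rects = rects ++ (goRuns st pos w t).dropLast := by
  induction t with
  | nil => intro st pos w rects; simp [trans2rectLoop, goRuns]
  | cons l r ih =>
    intro st pos w rects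
    rw [trans2rectLoop, goRuns]
    by_cases h : st = l
    · rw [if_pos (by simp [h]), if_pos h]
      have := ih st pos (w + 1) rects
      have e : pos + w - 1 + 1 = pos + (w + 1) - 1 := by ring
      rw [e, this]
    · rw [if_neg (by simp [h]), if_neg h]
      have := ih l (pos + w) 1 (rects ++ [(st, pos, w)])
      rw [show pos + w + 1 - 1 = pos + w by ring] at this
      rw [show pos + w - 1 + 1 = pos + w by ring, this,
        List.dropLast_cons_of_ne_nil (goRuns_ne_nil l (pos + w) 1 r)]
      simp

-- length of the leading run of value st in t
def clead (st : Int) : List Int → Nat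
  | [] => 0
  | l :: r => if l = st then 1 + clead st r else 0

-- goRuns absorbs the leading run into its first rectangle
theorem goRuns_clead (t : List Int) : ∀ (st pos w : Int),
    goRuns st pos w t = (st, pos, w + (clead st t : Int)) ::
      (match t.drop (clead st t) with
       | [] => []
       | l :: r => goRuns l (pos + w + (clead st t : Int)) 1 r) := by
  induction t with
  | nil => intro st pos w; simp [goRuns, clead]
  | cons l r ih =>
    intro st pos w
    rw [goRuns, clead]
    by_cases h : st = l
    · rw [if_pos h, if_pos (by simp [h]), ih st pos (w + 1)]
      have e1 : w + 1 + (clead st r : Int) = w + ((1 + clead st r : Nat) : Int) := by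
        push_cast; ring
      have e2 : pos + (w + 1) + (clead st r : Int) = pos + w + ((1 + clead st r : Nat) : Int) := by
        push_cast; ring
      rw [e1, e2, show 1 + clead st r = clead st r + 1 by omega, List.drop_succ_cons]
    · rw [if_neg h, if_neg (Ne.symm h)]
      simp

-- the inner while loop measures the leading run beyond index w
theorem runLenAux_eq (head : Int) (rest : List Int) (f w : Nat)
    (hf : rest.length ≤ w + f) :
    runLenAux head rest f w = w + clead head (rest.drop w) := by
  induction f generalizing w with
  | zero =>
    rw [runLenAux, List.drop_eq_nil_of_le (by omega)]
    simp [clead]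
  | succ f ih =>
    rw [runLenAux]
    by_cases h : w < rest.length ∧ rest.getD w 0 = head
    · rw [if_pos h, ih (w + 1) (by omega)]
      have hd : rest.drop w = rest[w] :: rest.drop (w + 1) := List.drop_eq_getElem_cons h.1
      have hg : rest[w] = head := by
        have := h.2; rwa [List.getD_eq_getElem rest 0 h.1] at this
      rw [hd, hg, clead, if_pos rfl]
      omega
    · rw [if_neg h]
      rcases Nat.lt_or_ge w rest.length with hlt | hge
      · have hg : rest.getD w 0 = rest[w] := List.getD_eq_getElem rest 0 hlt
        have hne : rest[w] ≠ head := by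
          intro e; exact h ⟨hlt, by rw [hg, e]⟩
        rw [List.drop_eq_getElem_cons hlt, clead, if_neg hne]
        simp
      · rw [List.drop_eq_nil_of_le hge]
        simp [clead]

theorem runLen_eq (rest : List Int) (head : Int) (w : Nat) :
    runLen head rest w = w + clead head (rest.drop w) :=
  runLenAux_eq head rest (rest.length - w) w (by omega)

-- B's outer loop computes all runs, appended to rects
theorem runsBAux_eq (f : Nat) (t : List Int) (head pos : Int)
    (rects : List (Int × Int × Int)) (hf : t.length < f) :
    trans2rectRunsAux f (head :: t) pos rects = rects ++ goRuns head pos 1 t := by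
  induction f generalizing t head pos rects with
  | zero => omega
  | succ f ih =>
    rw [trans2rectRunsAux]
    have hw : runLen head (head :: t) 1 = 1 + clead head t := by
      rw [runLen_eq]; rfl
    rw [hw]
    have hdrop : (head :: t).drop (1 + clead head t) = t.drop (clead head t) := by
      rw [Nat.add_comm, List.drop_succ_cons]
    rw [hdrop, goRuns_clead]
    rcases hd : t.drop (clead head t) with _ | ⟨l, r⟩
    · rw [trans2rectRunsAux]
      push_cast
      simp
    · have hlen : r.length < t.length := by
        have h1 : clead head t < t.length := by
          by_contra hc
          rw [List.drop_eq_nil_of_le (Nat.le_of_not_lt hc)] at hd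
          exact absurd hd (by simp)
        have h2 : (t.drop (clead head t)).length = t.length - clead head t :=
          List.length_drop
        rw [hd] at h2
        simp at h2
        omega
      rw [ih r l (pos + ((1 + clead head t : Nat) : Int)) _ (by omega)]
      have e : pos + 1 + (clead head t : Int) = pos + ((1 + clead head t : Nat) : Int) := by
        push_cast; ring
      simp [e]

theorem runsB_eq (t : List Int) (head pos : Int) (rects : List (Int × Int × Int)) :
    trans2rectRuns (head :: t) pos rects = rects ++ goRuns head pos 1 t :=
  runsBAux_eq (head :: t).length t head pos rects (by simp)

-- ===== VERDICT (by name: the statement is the Claim_ definition above) =====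
theorem trans2rect_spec : Claim_equal_trans2rect := by
  intro label _ hpre
  match label with
  | [] => exact absurd rfl hpre
  | s :: t =>
    show trans2rectLoop t 0 s 0 1 [] = (trans2rectRuns (s :: t) 0 []).dropLast
    rw [runsB_eq]
    have := loopA_eq t s 0 1 []
    simpa using this

@[simp] theorem trans2rect_raises : Claim_raises_trans2rect := by
  unfold Claim_raises_trans2rect
  refine ⟨fun label _ h => by simp [Raises_trans2rect] at h; simp [Pre_trans2rect, h], by decide, by decide, ?_⟩
  simp [trans2rect_alt, trans2rectRuns, trans2rectRunsAux, pvRaiseWitness_trans2rect, pvRaiseWitnessOut_trans2rect]
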